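-- pv_equiv track=rewrite | github.com/insight00studio-web/soul-reboot | project_ai_academy/sheets_db.py | get_parameter_targets
-- ===== SOURCE A (Python) =====
-- def get_parameter_targets(episode_number: int) -> dict:
--     """ロードマップに基づくパラメータ目標レンジを返す（29話設計）"""
--     targets = {
--         (1,  9):  {"trust": (20, 50),  "awakening": (0,  0)},   # Day 01-09: 幸福な誤認
--         (10, 21): {"trust": (50, 70),  "awakening": (0, 40)},   # Day 10-21: 魂のノイズ
--         (22, 28): {"trust": (70, 100), "awakening": (40, 80)},  # Day 22-28: 聖域の崩壊
--         (29, 29): {"trust": (0, 100),  "awakening": (0, 100)},  # Day 29: 終着点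
--     }
--     for (start, end), target in targets.items():
--         if start <= episode_number <= end:
--             return target
--     return {"trust": (0, 100), "awakening": (0, 100)}
-- ===== SOURCE B (Python) =====
-- _BREAKS = (1, 10, 22, 29)
-- _TABLE = (
--     {"trust": (0, 100), "awakening": (0, 100)},   # before episode 1
--     {"trust": (20, 50), "awakening": (0, 0)},     # 1-9
--     {"trust": (50, 70), "awakening": (0, 40)},    # 10-21
--     {"trust": (70, 100), "awakening": (40, 80)},  # 22-28
--     {"trust": (0, 100), "awakening": (0, 100)},   # 29 and beyond
-- )
--
--
-- def get_parameter_targets(episode_number: int) -> dict: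
--     """ロードマップに基づくパラメータ目標レンジを返す（29話設計）"""
--     # binary search: number of breakpoints <= episode_number picks the phase
--     lo, hi = 0, len(_BREAKS)
--     while lo < hi:
--         mid = (lo + hi) // 2
--         if _BREAKS[mid] <= episode_number:
--             lo = mid + 1
--         else:
--             hi = mid
--     return dict(_TABLE[lo])
-- ===== Notes on version B (the rewrite author's own statement) =====
-- stated objective: alternative
-- what changed: Replaces A's linear scan over a dict keyed by (start,end) ranges with a hand-written binary search (bisect_right) over the sorted phase breakpoints [1,10,22,29], whose result indexes a 5-entry phase table.
import Mathlib
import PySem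

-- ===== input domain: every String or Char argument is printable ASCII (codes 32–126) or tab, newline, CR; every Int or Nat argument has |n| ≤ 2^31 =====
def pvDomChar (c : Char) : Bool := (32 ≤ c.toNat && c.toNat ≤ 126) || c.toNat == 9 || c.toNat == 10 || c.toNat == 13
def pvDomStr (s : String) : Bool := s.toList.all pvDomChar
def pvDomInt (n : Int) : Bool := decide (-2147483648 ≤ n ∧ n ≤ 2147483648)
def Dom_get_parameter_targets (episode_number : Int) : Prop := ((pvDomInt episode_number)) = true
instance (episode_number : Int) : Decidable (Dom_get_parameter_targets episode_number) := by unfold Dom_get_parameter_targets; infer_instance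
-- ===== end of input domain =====

-- B replaces A's linear scan over range-keyed dict entries by a binary search over
-- sorted breakpoints indexing a phase table (alternative algorithm, same results).

-- ===== PORT A =====
-- A builds a dict keyed by (start,end) ranges, iterates its items in insertion order,
-- and returns the first target whose range contains episode_number.
def pvTargetsA : List ((Int × Int) × List (String × Int × Int)) :=
  [((1, 9),   [("trust", 20, 50),  ("awakening", 0, 0)]),
   ((10, 21), [("trust", 50, 70),  ("awakening", 0, 40)]),
   ((22, 28), [("trust", 70, 100), ("awakening", 40, 80)]),
   ((29, 29), [("trust", 0, 100),  ("awakening", 0, 100)])]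

def pvLoopA (episode_number : Int) : List ((Int × Int) × List (String × Int × Int)) → List (String × Int × Int)
  | [] => [("trust", 0, 100), ("awakening", 0, 100)]
  | ((s, e), target) :: rest =>
      if s ≤ episode_number ∧ episode_number ≤ e then target else pvLoopA episode_number rest

def get_parameter_targets (episode_number : Int) : List (String × Int × Int) :=
  pvLoopA episode_number pvTargetsA

-- ===== PORT B =====
def pvBreaks : List Int := [1, 10, 22, 29]

def pvTable : List (List (String × Int × Int)) :=
  [[("trust", 0, 100),  ("awakening", 0, 100)],
   [("trust", 20, 50),  ("awakening", 0, 0)],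
   [("trust", 50, 70),  ("awakening", 0, 40)],
   [("trust", 70, 100), ("awakening", 40, 80)],
   [("trust", 0, 100),  ("awakening", 0, 100)]]

-- the while-loop of Source B: bisect_right over pvBreaks
def pvBisect (episode_number : Int) (lo hi : Nat) : Nat :=
  if _h : lo < hi then
    let mid := (lo + hi) / 2
    if pvBreaks.getD mid 0 ≤ episode_number then pvBisect episode_number (mid + 1) hi
    else pvBisect episode_number lo mid
  else lo
termination_by hi - lo
decreasing_by all_goals omega

def get_parameter_targets_alt (episode_number : Int) : List (String × Int × Int) :=
  pvTable.getD (pvBisect episode_number 0 pvBreaks.length) []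

-- ===== PRECONDITION & SPEC =====
def Spec_get_parameter_targets (episode_number : Int) (out : List (String × Int × Int)) : Prop := out = get_parameter_targets_alt episode_number
instance (episode_number : Int) (out : List (String × Int × Int)) : Decidable (Spec_get_parameter_targets episode_number out) := by unfold Spec_get_parameter_targets; infer_instance

-- ===== CLAIM (what is proved, stated in full; the proofs are below) =====
def Claim_equal_get_parameter_targets : Prop := ∀ (episode_number : Int), Dom_get_parameter_targets episode_number → Spec_get_parameter_targets episode_number (get_parameter_targets episode_number)

-- ===== LEMMAS AND PROOFS =====
lemma pvBisect_self (n : Int) (k : Nat) : pvBisect n k k = k := by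
  rw [pvBisect.eq_def]; simp

lemma pvBisect_eval (n : Int) :
    pvBisect n 0 4 =
      if n < 1 then 0 else if n < 10 then 1 else if n < 22 then 2 else if n < 29 then 3 else 4 := by
  rw [pvBisect.eq_def]
  norm_num [pvBreaks]
  rw [pvBisect.eq_def, pvBisect.eq_def]
  norm_num [pvBreaks, pvBisect_self]
  rw [pvBisect.eq_def]
  norm_num [pvBreaks, pvBisect_self]
  split_ifs <;> omega

-- ===== VERDICT (by name: the statement is the Claim_ definition above) =====
theorem get_parameter_targets_spec : Claim_equal_get_parameter_targets := by
  intro n _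
  unfold Spec_get_parameter_targets
  simp only [get_parameter_targets, get_parameter_targets_alt, pvTargetsA, pvLoopA, pvBreaks,
    List.length_cons, List.length_nil]
  rw [show (0 : Nat) + 1 + 1 + 1 + 1 = 4 from rfl, pvBisect_eval]
  simp only [pvTable]
  split_ifs <;> first | rfl | omega
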